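-- pv_equiv track=rewrite | github.com/ajeseung/Coding_test_practice | 프로그래머스/2/17677. ［1차］ 뉴스 클러스터링/［1차］ 뉴스 클러스터링.py | to_bigrams
-- ===== SOURCE A (Python) =====
-- def to_bigrams(s: str):
--     s = s.lower()
--     out = []
--     for i in range(len(s) - 1):
--         a, b = s[i], s[i+1]
--         if 'a' <= a <= 'z' and 'a' <= b <= 'z':
--             out.append(a + b)
--     return out
-- ===== SOURCE B (Python) =====
-- def to_bigrams(s: str):
--     # tokenize into maximal lowercase-ASCII runs, then emit adjacent bigrams per run
--     runs = []
--     cur = ""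
--     for ch in s.lower():
--         if 'a' <= ch <= 'z':
--             cur += ch
--         else:
--             if cur:
--                 runs.append(cur)
--             cur = ""
--     if cur:
--         runs.append(cur)
--     out = []
--     for r in runs:
--         for x, y in zip(r, r[1:]):
--             out.append(x + y)
--     return out
-- ===== Notes on version B (the rewrite author's own statement) =====
-- stated objective: alternative
-- what changed: Replaced the single index-scan with a pairwise test by a tokenize-then-bigram decomposition: lowercase, group maximal runs of a-z characters, then emit adjacent bigrams of each run via zip.
import Mathlib
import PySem

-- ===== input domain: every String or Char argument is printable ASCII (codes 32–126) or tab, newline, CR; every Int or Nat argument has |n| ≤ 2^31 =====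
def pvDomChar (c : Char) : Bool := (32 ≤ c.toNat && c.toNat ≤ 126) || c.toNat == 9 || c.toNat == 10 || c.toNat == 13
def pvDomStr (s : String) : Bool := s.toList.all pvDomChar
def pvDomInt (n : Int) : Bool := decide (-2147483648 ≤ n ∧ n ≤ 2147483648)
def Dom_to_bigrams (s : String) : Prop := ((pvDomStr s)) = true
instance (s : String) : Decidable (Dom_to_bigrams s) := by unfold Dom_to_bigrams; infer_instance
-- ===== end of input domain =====

-- B replaces A's single index scan with a tokenize-then-bigram decomposition (same cost, different structure).


-- ===== PORT A =====
-- literal port of A: lowercase, then scan indices 0..len-2 appending s[i]+s[i+1] when both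
-- chars are in 'a'..'z' (both indices are always in range, so pyGetD is exact here)
def to_bigrams (s : String) : List String :=
  let t := (PySem.Str.lower s).toList
  (PySem.List.pyRange 0 ((t.length : Int) - 1) 1).foldl
    (fun out i =>
      let a := PySem.List.pyGetD t i ' '
      let b := PySem.List.pyGetD t (i + 1) ' '
      if ('a' ≤ a && a ≤ 'z') && ('a' ≤ b && b ≤ 'z') then out ++ [String.ofList [a, b]] else out)
    []

-- ===== PORT B =====
def pvIsLower (c : Char) : Bool := 'a' ≤ c && c ≤ 'z'

-- Source B's grouping loop: accumulate consecutive a-z chars, flush on a non-letter and at the end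
def pvRuns : List Char → List Char → List (List Char)
  | [], cur => if cur = [] then [] else [cur]
  | ch :: rest, cur =>
      if pvIsLower ch then pvRuns rest (cur ++ [ch])
      else if cur = [] then pvRuns rest [] else cur :: pvRuns rest []

def to_bigrams_alt (s : String) : List String :=
  let runs := pvRuns (PySem.Str.lower s).toList []
  runs.foldl
    (fun out r =>
      out ++ (r.zip (PySem.List.slice r (some 1) none)).map (fun p => String.ofList [p.1, p.2]))
    []

-- ===== PRECONDITION & SPEC =====
def Spec_to_bigrams (s : String) (out : List String) : Prop := out = to_bigrams_alt s
instance (s : String) (out : List String) : Decidable (Spec_to_bigrams s out) := by unfold Spec_to_bigrams; infer_instance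

-- ===== CLAIM (what is proved, stated in full; the proofs are below) =====
def Claim_equal_to_bigrams : Prop := ∀ (s : String), Dom_to_bigrams s → Spec_to_bigrams s (to_bigrams s)

-- ===== LEMMAS AND PROOFS =====

-- reference form: adjacent-pair scan of a char list
def pvScan : List Char → List String
  | a :: b :: r => (if pvIsLower a && pvIsLower b then [String.ofList [a, b]] else []) ++ pvScan (b :: r)
  | _ => []

def pvBig (r : List Char) : List String :=
  (r.zip r.tail).map (fun p => String.ofList [p.1, p.2])

lemma pvBig_nil : pvBig [] = [] := rfl
lemma pvBig_single (a : Char) : pvBig [a] = [] := rfl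
lemma pvBig_cons_cons (a b : Char) (r : List Char) :
    pvBig (a :: b :: r) = String.ofList [a, b] :: pvBig (b :: r) := rfl

lemma pvBig_append (cur : List Char) (a : Char) :
    pvBig (cur ++ [a]) =
      pvBig cur ++ (match cur.getLast? with | none => [] | some c => [String.ofList [c, a]]) := by
  induction cur with
  | nil => simp [pvBig_nil, pvBig_single]
  | cons x xs ih =>
      cases xs with
      | nil => simp [pvBig_single, pvBig_cons_cons]
      | cons y ys =>
          simp only [List.cons_append, pvBig_cons_cons, List.getLast?_cons_cons] at *
          simp [ih]

lemma pvScan_cons_not_low (a : Char) (r : List Char) (h : pvIsLower a = false) :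
    pvScan (a :: r) = pvScan r := by
  cases r with
  | nil => rfl
  | cons b rr => simp [pvScan, h]

lemma pvScan_cons_cons_not_low₂ (c a : Char) (r : List Char) (h : pvIsLower a = false) :
    pvScan (c :: a :: r) = pvScan r := by
  simp [pvScan, h, pvScan_cons_not_low a r h]

-- loop invariant of Source B's grouping pass
lemma pvRuns_eq (t : List Char) : ∀ cur, (∀ x ∈ cur, pvIsLower x) →
    (pvRuns t cur).flatMap pvBig =
      pvBig cur ++ (match cur.getLast? with | none => pvScan t | some c => pvScan (c :: t)) := by
  induction t with
  | nil =>
      intro cur _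
      by_cases h : cur = []
      · subst h; simp [pvRuns, pvBig_nil, pvScan]
      · rw [pvRuns, if_neg h]
        obtain ⟨c, hc⟩ : ∃ c, cur.getLast? = some c := by
          cases hcl : cur.getLast? with
          | none => exact absurd (List.getLast?_eq_none_iff.mp hcl) h
          | some c => exact ⟨c, rfl⟩
        rw [hc]
        simp [pvScan]
  | cons a r ih =>
      intro cur hcur
      by_cases ha : pvIsLower a
      · -- letter: extend the current run
        have hcur' : ∀ x ∈ cur ++ [a], pvIsLower x := by
          intro x hx
          rcases List.mem_append.mp hx with h | h
          · exact hcur x h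
          · simp at h; subst h; exact ha
        rw [pvRuns, if_pos ha, ih (cur ++ [a]) hcur', pvBig_append]
        have hlast : (cur ++ [a]).getLast? = some a := by simp
        rw [hlast]
        cases hc : cur.getLast? with
        | none =>
            have : cur = [] := List.getLast?_eq_none_iff.mp hc
            subst this
            simp [pvBig_nil]
        | some c =>
            have hcl : pvIsLower c := hcur c (List.mem_of_getLast? hc)
            simp [pvScan, hcl, ha]
      · -- non-letter: flush the current run and restart
        have hafalse : pvIsLower a = false := by simpa using ha
        have hnext := ih [] (by simp)
        simp only [List.getLast?_nil, pvBig_nil, List.nil_append] at hnext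
        rw [pvRuns, if_neg ha]
        by_cases h : cur = []
        · subst h
          simp [hnext, pvScan_cons_not_low a r hafalse, pvBig_nil]
        · rw [if_neg h]
          obtain ⟨c, hc⟩ : ∃ c, cur.getLast? = some c := by
            cases hcl : cur.getLast? with
            | none => exact absurd (List.getLast?_eq_none_iff.mp hcl) h
            | some c => exact ⟨c, rfl⟩
          rw [hc]
          simp [hnext, pvScan_cons_cons_not_low₂ c a r hafalse]

-- A's filtered index scan over List.range equals the adjacent-pair scan
lemma scan_eq_filter (t : List Char) :
    ((List.range (t.length - 1)).filter
        (fun k => pvIsLower (t.getD k ' ') && pvIsLower (t.getD (k+1) ' '))).map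
      (fun k => String.ofList [t.getD k ' ', t.getD (k+1) ' ']) = pvScan t := by
  induction t with
  | nil => rfl
  | cons a r ih =>
      cases r with
      | nil => rfl
      | cons b rr =>
          have hlen : (a :: b :: rr).length - 1 = rr.length + 1 := by simp
          rw [hlen, List.range_succ_eq_map, List.filter_cons]
          have hIH := ih
          simp only [List.length_cons, Nat.add_sub_cancel] at hIH
          have hshift : ((fun k => pvIsLower ((a :: b :: rr).getD k ' ') &&
              pvIsLower ((a :: b :: rr).getD (k + 1) ' ')) ∘ Nat.succ) =
              fun k => pvIsLower ((b :: rr).getD k ' ') && pvIsLower ((b :: rr).getD (k + 1) ' ') := by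
            funext k; rfl
          by_cases hp : (pvIsLower a && pvIsLower b) = true
          · rw [if_pos (by simpa using hp), List.map_cons, List.filter_map, List.map_map, hshift]
            have hshift2 : ((fun k => String.ofList [(a :: b :: rr).getD k ' ', (a :: b :: rr).getD (k + 1) ' ']) ∘ Nat.succ) =
                fun k => String.ofList [(b :: rr).getD k ' ', (b :: rr).getD (k + 1) ' '] := by
              funext k; rfl
            rw [hshift2, hIH]
            simp [pvScan, hp]
          · rw [if_neg (by simpa using hp), List.filter_map, List.map_map, hshift]
            have hshift2 : ((fun k => String.ofList [(a :: b :: rr).getD k ' ', (a :: b :: rr).getD (k + 1) ' ']) ∘ Nat.succ) =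
                fun k => String.ofList [(b :: rr).getD k ' ', (b :: rr).getD (k + 1) ' '] := by
              funext k; rfl
            rw [hshift2, hIH]
            simp [pvScan, hp]

-- A's pyRange fold equals the adjacent-pair scan
lemma foldA_eq_scan (t : List Char) :
    (PySem.List.pyRange 0 ((t.length : Int) - 1) 1).foldl
      (fun out i =>
        let a := PySem.List.pyGetD t i ' '
        let b := PySem.List.pyGetD t (i + 1) ' '
        if ('a' ≤ a && a ≤ 'z') && ('a' ≤ b && b ≤ 'z') then out ++ [String.ofList [a, b]] else out)
      [] = pvScan t := by
  rw [PySem.List.foldl_append_if, PySem.List.pyRange_one]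
  have hcast : ((t.length : Int) - 1 - 0).toNat = t.length - 1 := by omega
  rw [hcast, List.filter_map, List.map_map]
  have h1 : ∀ k : Nat, PySem.List.pyGetD t ((0 : Int) + k) ' ' = t.getD k ' ' := by
    intro k; simp [PySem.List.pyGetD_natCast]
  have h2 : ∀ k : Nat, PySem.List.pyGetD t ((0 : Int) + k + 1) ' ' = t.getD (k + 1) ' ' := by
    intro k
    have : ((0 : Int) + k + 1) = ((k + 1 : Nat) : Int) := by push_cast; ring
    rw [this, PySem.List.pyGetD_natCast]
  simp only [Function.comp_def, h1, h2]
  rw [List.nil_append]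
  rw [← scan_eq_filter t]
  rfl

-- ===== VERDICT (by name: the statement is the Claim_ definition above) =====
theorem to_bigrams_spec : Claim_equal_to_bigrams := by
  intro s _
  unfold Spec_to_bigrams to_bigrams to_bigrams_alt
  rw [foldA_eq_scan]
  rw [PySem.List.foldl_append_eq_flatMap, List.nil_append]
  have : ∀ r : List Char,
      (r.zip (PySem.List.slice r (some 1) none)).map (fun p => String.ofList [p.1, p.2]) = pvBig r := by
    intro r; rw [PySem.List.slice_from_one]; rfl
  simp only [this]
  rw [pvRuns_eq _ [] (by simp)]
  simp [pvBig_nil]
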